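-- pv_equiv track=rewrite | github.com/bbnerino/Algolithm | 2023/2월/프로그래머스/숫자게임.py | solution
-- ===== SOURCE A (Python) =====
-- def solution(A, B):
--     A.sort()
--     B.sort()
--     result = 0
--     a = A.pop(0)
--     while B:
--       b = B.pop(0)
--       if a<b :
--         result += 1
--         if A:
--           a = A.pop(0)
--
--     return result
-- ===== SOURCE B (Python) =====
-- def solution(A, B):
--     # One sort + index pointer instead of repeated pop(0): O(n log n) vs A's O(n^2).
--     # Unlike A, B does not mutate its arguments; equivalence is about the return value.
--     sa = sorted(A)
--     sb = sorted(B)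
--     i = 0
--     result = 0
--     for b in sb:
--         if sa[i] < b:
--             result += 1
--             if i + 1 < len(sa):
--                 i += 1
--     return result
-- ===== Notes on version B (the rewrite author's own statement) =====
-- stated objective: faster
-- what changed: Replaces the destructive pop(0) queue walk (each pop shifts the whole list) by a single sort of copies and an index pointer advanced over sorted A, so no element is ever removed or shifted.
import Mathlib
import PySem

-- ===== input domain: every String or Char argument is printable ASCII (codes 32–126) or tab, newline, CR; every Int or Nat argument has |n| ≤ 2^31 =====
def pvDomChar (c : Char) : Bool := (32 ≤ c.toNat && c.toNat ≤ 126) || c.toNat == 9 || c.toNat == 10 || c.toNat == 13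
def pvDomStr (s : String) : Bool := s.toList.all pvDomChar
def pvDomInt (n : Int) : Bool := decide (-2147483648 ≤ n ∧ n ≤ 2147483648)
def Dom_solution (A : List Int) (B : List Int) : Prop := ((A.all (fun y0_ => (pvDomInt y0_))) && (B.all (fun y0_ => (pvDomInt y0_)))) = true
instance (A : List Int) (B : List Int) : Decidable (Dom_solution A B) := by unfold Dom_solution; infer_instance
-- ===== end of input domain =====

-- B replaces A's destructive pop(0) queue walk with one sort and an index pointer (no mutation of
-- the arguments, unlike A which sorts/pops them in place); equivalence is about the return value.

-- ===== PORT A =====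
-- the while loop: state = (remaining B queue, remaining A queue, current a, result)
def solA_loop : List Int → List Int → Int → Int → Int
  | [], _, _, result => result
  | b :: Bs, Arest, a, result =>
    if a < b then
      match Arest with
      | [] => solA_loop Bs [] a (result + 1)
      | a' :: As => solA_loop Bs As a' (result + 1)
    else solA_loop Bs Arest a result

def solution (A : List Int) (B : List Int) : Int :=
  let sa := PySem.List.sorted A (fun x => x) false
  let sb := PySem.List.sorted B (fun x => x) false
  match sa with
  | [] => 0          -- Python raises IndexError here (A.pop(0) from empty); excluded by Pre_
  | a :: As => solA_loop sb As a 0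

-- ===== PORT B =====
-- the for loop: state = (index i into sa, result)
def solB_loop (sa : List Int) : List Int → Nat → Int → Int
  | [], _, result => result
  | b :: Bs, i, result =>
    if sa.getD i 0 < b then   -- sa[i]; i is in range whenever sa ≠ [] (Pre_), so getD is exact
      if i + 1 < sa.length then solB_loop sa Bs (i + 1) (result + 1)
      else solB_loop sa Bs i (result + 1)
    else solB_loop sa Bs i result

def solution_alt (A : List Int) (B : List Int) : Int :=
  let sa := PySem.List.sorted A (fun x => x) false
  let sb := PySem.List.sorted B (fun x => x) false
  solB_loop sa sb 0 0

-- ===== PRECONDITION & SPEC =====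
-- Pre_ excludes exactly A = [], where the Python A raises IndexError on A.pop(0).
def Pre_solution (A : List Int) (B : List Int) : Prop := A ≠ []
instance (A : List Int) (B : List Int) : Decidable (Pre_solution A B) := by
  unfold Pre_solution; infer_instance

def pvWitness_solution : List Int × List Int := ([5, 1, 3], [2, 6, 4])

def Spec_solution (A : List Int) (B : List Int) (out : Int) : Prop := out = solution_alt A B
instance (A : List Int) (B : List Int) (out : Int) : Decidable (Spec_solution A B out) := by
  unfold Spec_solution; infer_instance

-- ===== CLAIM (what is proved, stated in full; the proofs are below) =====
def Claim_equal_solution : Prop := ∀ (A : List Int) (B : List Int),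
  Dom_solution A B → Pre_solution A B → Spec_solution A B (solution A B)

-- ===== LEMMAS AND PROOFS =====

-- Loop correspondence: A's state (remaining queue, current a) is exactly
-- (sa.drop (i+1), sa[i]) for B's pointer i, as long as i is in range.
theorem loop_eq (sa : List Int) (Bs : List Int) :
    ∀ (i : Nat) (r : Int), i < sa.length →
      solA_loop Bs (sa.drop (i + 1)) (sa.getD i 0) r = solB_loop sa Bs i r := by
  induction Bs with
  | nil => intro i r _; simp [solA_loop, solB_loop]
  | cons b Bs ih =>
    intro i r hi
    simp only [solA_loop, solB_loop]
    split
    · by_cases h2 : i + 1 < sa.length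
      · have hdrop : sa.drop (i + 1) = sa[i + 1] :: sa.drop (i + 2) :=
          List.drop_eq_getElem_cons h2
        rw [hdrop]
        simp only [if_pos h2]
        have : sa.getD (i + 1) 0 = sa[i + 1] := by
          simp [List.getD_eq_getElem?_getD, List.getElem?_eq_getElem h2]
        rw [← this]
        exact ih (i + 1) (r + 1) h2
      · have hdrop : sa.drop (i + 1) = [] := List.drop_eq_nil_of_le (by omega)
        rw [hdrop]
        simp only [if_neg h2]
        have := ih i (r + 1) hi
        rw [hdrop] at this
        exact this
    · exact ih i r hi

theorem solution_eq_alt (A B : List Int) (h : A ≠ []) : solution A B = solution_alt A B := by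
  unfold solution solution_alt
  have hperm := PySem.List.sorted_perm A (fun x => x) false
  cases hsa : PySem.List.sorted A (fun x => x) false with
  | nil =>
    exfalso
    exact h (List.Perm.nil_eq (hsa ▸ hperm)).symm
  | cons a As =>
    simp only
    have hlen : 0 < (PySem.List.sorted A (fun x => x) false).length := by
      rw [hsa]; simp
    have := loop_eq (PySem.List.sorted A (fun x => x) false)
      (PySem.List.sorted B (fun x => x) false) 0 0 hlen
    rw [hsa] at this
    simpa using this

-- ===== VERDICT (by name: the statement is the Claim_ definition above) =====
theorem solution_spec : Claim_equal_solution := by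
  intro A B _ hpre
  unfold Spec_solution
  exact solution_eq_alt A B hpre
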